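-- pv_equiv track=rewrite | github.com/slowwavesleep/ancient-lang-adapters | predict_masked_char_lzh.py | replace_substrings
-- ===== SOURCE A (Python) =====
-- def replace_substrings(input_string, replacement_dict):
--     sorted_keys = sorted(replacement_dict.keys(), key=len, reverse=True)
--
--     index = 0
--
--     result = ""
--
--     replacements = dict()
--
--     # Iterate through the string
--     while index < len(input_string):
--         replaced = False
--
--         for key in sorted_keys:
--             if input_string[index:].startswith(key):
--                 result += replacement_dict[key]
--                 index += len(key)
--                 replaced = True
--                 replacements[key] = replacement_dict[key]
--                 break
--
--         # If no replacement was made, just add the current character to the result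
--         if not replaced:
--             result += input_string[index]
--             replacements[input_string[index]] = input_string[index]
--             index += 1
--
--     return result, replacements
-- ===== SOURCE B (Python) =====
-- def replace_substrings(input_string, replacement_dict):
--     # Prefix-set longest match: instead of trying every key at every position,
--     # walk forward through a hash set of all key prefixes (a flattened trie)
--     # and take the deepest position that is itself a key.
--     prefixes = set()
--     maxlen = 0
--     for k in replacement_dict:
--         for j in range(1, len(k) + 1):
--             prefixes.add(k[:j])
--         maxlen = max(maxlen, len(k))
--     out = []
--     replacements = {}
--     i = 0
--     n = len(input_string)
--     while i < n:
--         best = -1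
--         j = i
--         limit = min(n, i + maxlen)
--         while j < limit and input_string[i:j + 1] in prefixes:
--             j += 1
--             if input_string[i:j] in replacement_dict:
--                 best = j
--         if best >= 0:
--             key = input_string[i:best]
--             replacements[key] = replacement_dict[key]
--             out.append(replacement_dict[key])
--             i = best
--         else:
--             c = input_string[i]
--             out.append(c)
--             replacements[c] = c
--             i += 1
--     return "".join(out), replacements
-- ===== Notes on version B (the rewrite author's own statement) =====
-- stated objective: faster
-- what changed: B builds a hash set of all key prefixes (a flattened trie) once and, at each position, walks forward through it to the deepest slice that is itself a key, instead of A's per-position linear scan over the length-sorted key list with startswith; the output is collected in a list and joined once.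
import Mathlib
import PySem

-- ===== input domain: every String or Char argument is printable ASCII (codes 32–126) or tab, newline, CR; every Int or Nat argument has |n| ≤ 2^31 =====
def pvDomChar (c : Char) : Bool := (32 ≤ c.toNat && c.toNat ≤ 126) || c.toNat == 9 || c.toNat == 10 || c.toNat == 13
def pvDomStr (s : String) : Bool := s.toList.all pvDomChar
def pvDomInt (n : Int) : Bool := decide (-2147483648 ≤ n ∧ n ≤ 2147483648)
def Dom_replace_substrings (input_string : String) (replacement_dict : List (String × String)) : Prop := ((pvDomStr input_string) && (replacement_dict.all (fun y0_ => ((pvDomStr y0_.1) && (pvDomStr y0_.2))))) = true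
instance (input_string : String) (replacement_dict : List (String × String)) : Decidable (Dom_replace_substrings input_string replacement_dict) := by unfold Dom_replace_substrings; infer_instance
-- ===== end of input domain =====

-- B replaces A's per-position scan over the length-sorted key list by a single forward walk
-- through a hash set of all key prefixes (a flattened trie), taking the deepest position
-- that is itself a key; the pieces are joined once at the end.

-- ===== PORT A =====
-- the while-loop of A, fuel = remaining length (each iteration consumes ≥ 1 char
-- whenever every key is non-empty, which Pre_ guarantees)
def pvLoopA (d : PySem.Dict String String) (skeys : List String) :
    Nat → List Char → List Char → PySem.Dict String String →
    List Char × PySem.Dict String String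
  | 0, _, res, reps => (res, reps)
  | _ + 1, [], res, reps => (res, reps)
  | fuel + 1, c :: rest, res, reps =>
    match skeys.find? (fun k => PySem.Chars.startswith (c :: rest) k.toList) with
    | some k =>
        pvLoopA d skeys fuel ((c :: rest).drop k.toList.length)
          (res ++ (d.getD k "").toList) (reps.insert k (d.getD k ""))
    | none =>
        pvLoopA d skeys fuel rest (res ++ [c])
          (reps.insert (String.ofList [c]) (String.ofList [c]))

def replace_substrings (input_string : String) (replacement_dict : List (String × String)) : String × (List (String × String)) :=
  let d := PySem.Dict.ofList replacement_dict
  let skeys := PySem.List.sorted d.keys (fun k => k.toList.length) true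
  let cs := input_string.toList
  let r := pvLoopA d skeys cs.length cs [] PySem.Dict.empty
  (String.ofList r.1, r.2.items)

-- ===== PORT B =====
-- Source B's inner while: walk j forward while the next slice is still a key prefix,
-- remembering the deepest j whose slice is itself a key (best = -1 ↦ none);
-- 'j < limit' is carried as fuel = limit - j
def pvWalk (d : PySem.Dict String String) (prefs : PySem.Set String) (suf : List Char) :
    Nat → Nat → Option Nat → Option Nat
  | 0, _, best => best
  | fuel + 1, j, best =>
    if PySem.Set.contains prefs (String.ofList (suf.take (j + 1))) then
      pvWalk d prefs suf fuel (j + 1)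
        (if (d.get? (String.ofList (suf.take (j + 1)))).isSome then some (j + 1) else best)
    else best

-- Source B's outer while over the suffix, collecting pieces in a list
def pvLoopB (d : PySem.Dict String String) (prefs : PySem.Set String) (maxlen : Nat) :
    Nat → List Char → List (List Char) → PySem.Dict String String →
    List (List Char) × PySem.Dict String String
  | 0, _, out, reps => (out, reps)
  | _ + 1, [], out, reps => (out, reps)
  | fuel + 1, c :: rest, out, reps =>
    match pvWalk d prefs (c :: rest) (min (c :: rest).length maxlen) 0 none with
    | some b =>
        let key := String.ofList ((c :: rest).take b)
        let v := d.getD key ""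
        pvLoopB d prefs maxlen fuel ((c :: rest).drop b)
          (out ++ [v.toList]) (reps.insert key v)
    | none =>
        pvLoopB d prefs maxlen fuel rest (out ++ [[c]])
          (reps.insert (String.ofList [c]) (String.ofList [c]))

def replace_substrings_alt (input_string : String) (replacement_dict : List (String × String)) : String × (List (String × String)) :=
  let d := PySem.Dict.ofList replacement_dict
  -- for k in dict: for j in range(1, len(k)+1): prefixes.add(k[:j]); maxlen = max(maxlen, len(k))
  let prefs := d.keys.foldl (fun s k =>
    (List.range k.toList.length).foldl
      (fun s j => PySem.Set.add s (String.ofList (k.toList.take (j + 1)))) s) PySem.Set.empty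
  let maxlen := d.keys.foldl (fun m k => max m k.toList.length) 0
  let cs := input_string.toList
  let r := pvLoopB d prefs maxlen cs.length cs [] PySem.Dict.empty
  (String.ofList r.1.flatten, r.2.items)

-- ===== PRECONDITION & SPEC =====
-- Pre_ excludes non-empty inputs paired with a dict containing the empty-string key: on those
-- A loops forever as soon as some position matches no non-empty key (B still returns there,
-- and where A does return — every position matched by a non-empty key — B returns the same value).
def Pre_replace_substrings (input_string : String) (replacement_dict : List (String × String)) : Prop :=
  replacement_dict.all (fun p => !(p.1 == "")) = true ∨ input_string = ""
instance (input_string : String) (replacement_dict : List (String × String)) : Decidable (Pre_replace_substrings input_string replacement_dict) := by unfold Pre_replace_substrings; infer_instance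

def pvWitness_replace_substrings : String × (List (String × String)) :=
  ("abcab c", [("ab", "X"), ("c", "YZ")])

def Spec_replace_substrings (input_string : String) (replacement_dict : List (String × String)) (out : String × (List (String × String))) : Prop := out = replace_substrings_alt input_string replacement_dict
instance (input_string : String) (replacement_dict : List (String × String)) (out : String × (List (String × String))) : Decidable (Spec_replace_substrings input_string replacement_dict out) := by unfold Spec_replace_substrings; infer_instance

-- ===== CLAIM (what is proved, stated in full; the proofs are below) =====
def Claim_equal_replace_substrings : Prop := ∀ (input_string : String) (replacement_dict : List (String × String)), Dom_replace_substrings input_string replacement_dict → Pre_replace_substrings input_string replacement_dict → Spec_replace_substrings input_string replacement_dict (replace_substrings input_string replacement_dict)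

-- ===== LEMMAS AND PROOFS =====

-- find? over a descending-by-length list returns a longest matching element
theorem pv_find?_max {p : String → Bool} :
    ∀ {l : List String} {k : String},
      l.Pairwise (fun a b => b.toList.length ≤ a.toList.length) →
      l.find? p = some k →
      ∀ k' ∈ l, p k' = true → k'.toList.length ≤ k.toList.length := by
  intro l
  induction l with
  | nil => intro k _ h; simp at h
  | cons a t ih =>
    intro k hp hf k' hk' hpk'
    rw [List.pairwise_cons] at hp
    rw [List.find?_cons] at hf
    cases hpa : p a with
    | true =>
      rw [hpa] at hf; simp at hf; subst hf
      rcases List.mem_cons.mp hk' with h | h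
      · subst h; exact Nat.le_refl _
      · exact hp.1 k' h
    | false =>
      rw [hpa] at hf; simp at hf
      rcases List.mem_cons.mp hk' with h | h
      · subst h; rw [hpa] at hpk'; cases hpk'
      · exact ih hp.2 hf k' h hpk'

-- membership is preserved / created by a foldl of Set.add
theorem pv_mem_foldl_add {beta : Type} (g : beta → String) :
    ∀ (l : List beta) (s : PySem.Set String) (x : String),
      (x ∈ s ∨ ∃ b ∈ l, g b = x) →
      x ∈ l.foldl (fun s b => PySem.Set.add s (g b)) s := by
  intro l
  induction l with
  | nil =>
    intro s x h
    rcases h with h | ⟨b, hb, _⟩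
    · exact h
    · simp at hb
  | cons a t ih =>
    intro s x h
    simp only [List.foldl_cons]
    apply ih
    rcases h with h | ⟨b, hb, he⟩
    · exact Or.inl ((PySem.Set.mem_add _ _ _).mpr (Or.inl h))
    · rcases List.mem_cons.mp hb with h1 | h1
      · subst h1; exact Or.inl ((PySem.Set.mem_add _ _ _).mpr (Or.inr he.symm))
      · exact Or.inr ⟨b, h1, he⟩

-- the inner prefix loop of Source B: keeps old members, adds every non-empty prefix of k
theorem pv_inner_mem (s : PySem.Set String) (k x : String) (h : x ∈ s) :
    x ∈ (List.range k.toList.length).foldl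
      (fun s j => PySem.Set.add s (String.ofList (k.toList.take (j + 1)))) s :=
  pv_mem_foldl_add _ _ s x (Or.inl h)

theorem pv_inner_add (s : PySem.Set String) (k : String) (i : Nat) (hi : i < k.toList.length) :
    String.ofList (k.toList.take (i + 1)) ∈ (List.range k.toList.length).foldl
      (fun s j => PySem.Set.add s (String.ofList (k.toList.take (j + 1)))) s :=
  pv_mem_foldl_add _ _ s _ (Or.inr ⟨i, List.mem_range.mpr hi, rfl⟩)

-- the outer prefix loop preserves membership
theorem pv_outer_mono :
    ∀ (l : List String) (s : PySem.Set String) (x : String), x ∈ s →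
      x ∈ l.foldl (fun s k =>
        (List.range k.toList.length).foldl
          (fun s j => PySem.Set.add s (String.ofList (k.toList.take (j + 1)))) s) s := by
  intro l
  induction l with
  | nil => intro s x h; exact h
  | cons a t ih =>
    intro s x h
    simp only [List.foldl_cons]
    exact ih _ x (pv_inner_mem s a x h)

-- every non-empty prefix of a key is in the prefix set Source B builds
theorem pv_prefs_mem :
    ∀ (keys : List String) (s : PySem.Set String) (k : String), k ∈ keys →
      ∀ (i : Nat), i < k.toList.length →
      String.ofList (k.toList.take (i + 1)) ∈
        keys.foldl (fun s k =>
          (List.range k.toList.length).foldl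
            (fun s j => PySem.Set.add s (String.ofList (k.toList.take (j + 1)))) s) s := by
  intro keys
  induction keys with
  | nil => intro s k hk; cases hk
  | cons a t ih =>
    intro s k hk i hi
    simp only [List.foldl_cons]
    rcases List.mem_cons.mp hk with h | h
    · subst h
      exact pv_outer_mono t _ _ (pv_inner_add s k i hi)
    · exact ih _ k h i hi

-- the seed of the max-fold only grows
theorem pv_foldl_max_seed :
    ∀ (l : List String) (m : Nat), m ≤ l.foldl (fun m k => max m k.toList.length) m := by
  intro l
  induction l with
  | nil => intro m; exact le_rfl
  | cons a t ih =>
    intro m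
    simp only [List.foldl_cons]
    exact le_trans (le_max_left _ _) (ih _)

-- max-fold bounds every element's length
theorem pv_foldl_max_ge :
    ∀ (l : List String) (m : Nat) (k : String), k ∈ l →
      k.toList.length ≤ l.foldl (fun m k => max m k.toList.length) m := by
  intro l
  induction l with
  | nil => intro m k hk; cases hk
  | cons a t ih =>
    intro m k hk
    simp only [List.foldl_cons]
    rcases List.mem_cons.mp hk with h | h
    · subst h
      exact le_trans (le_max_right _ _) (pv_foldl_max_seed t _)
    · exact ih _ k h

-- the walk never changes best when no deeper slice is a key
theorem pv_walk_stable (d : PySem.Dict String String) (prefs : PySem.Set String)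
    (suf : List Char) :
    ∀ (fuel j : Nat) (best : Option Nat),
      (∀ i, j < i → i ≤ j + fuel → (d.get? (String.ofList (suf.take i))).isSome = false) →
      pvWalk d prefs suf fuel j best = best := by
  intro fuel
  induction fuel with
  | zero => intro j best _; rfl
  | succ n ih =>
    intro j best h
    rw [pvWalk]
    split
    · have h1 : (d.get? (String.ofList (suf.take (j + 1)))).isSome = false :=
        h (j + 1) (Nat.lt_succ_self j) (by omega)
      rw [h1]
      simp only [Bool.false_eq_true, if_false]
      exact ih (j + 1) best (fun i hi1 hi2 => h i (by omega) (by omega))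
    · rfl

-- the walk reaches jm (all prefixes present) and records it
theorem pv_walk_reach (d : PySem.Dict String String) (prefs : PySem.Set String)
    (suf : List Char) (jm : Nat)
    (hmem : (d.get? (String.ofList (suf.take jm))).isSome = true)
    (hpref : ∀ i, i < jm → PySem.Set.contains prefs (String.ofList (suf.take (i + 1))) = true) :
    ∀ (fuel j : Nat) (best : Option Nat), j < jm → jm ≤ j + fuel →
      pvWalk d prefs suf fuel j best = pvWalk d prefs suf (j + fuel - jm) jm (some jm) := by
  intro fuel
  induction fuel with
  | zero => intro j best h1 h2; omega
  | succ n ih =>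
    intro j best h1 h2
    rw [pvWalk]
    rw [hpref j h1]
    simp only [if_true]
    by_cases hj : j + 1 = jm
    · subst hj
      rw [hmem]
      simp only [if_true]
      have h3 : j + (n + 1) - (j + 1) = n := by omega
      rw [h3]
    · have h1' : j + 1 < jm := by omega
      rw [ih (j + 1) _ h1' (by omega)]
      have h4 : j + 1 + n - jm = j + (n + 1) - jm := by omega
      rw [h4]

-- combine: the walk returns exactly the longest key-length jm
theorem pv_walk_eq_some (d : PySem.Dict String String) (prefs : PySem.Set String)
    (suf : List Char) (jm limit : Nat)
    (hjm1 : 1 ≤ jm) (hjml : jm ≤ limit)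
    (hmem : (d.get? (String.ofList (suf.take jm))).isSome = true)
    (hpref : ∀ i, i < jm → PySem.Set.contains prefs (String.ofList (suf.take (i + 1))) = true)
    (hmax : ∀ i, jm < i → i ≤ limit → (d.get? (String.ofList (suf.take i))).isSome = false) :
    pvWalk d prefs suf limit 0 none = some jm := by
  rw [pv_walk_reach d prefs suf jm hmem hpref limit 0 none (by omega) (by omega)]
  rw [pv_walk_stable d prefs suf _ jm (some jm) (fun i hi1 hi2 => hmax i hi1 (by omega))]

theorem pv_walk_eq_none (d : PySem.Dict String String) (prefs : PySem.Set String)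
    (suf : List Char) (limit : Nat)
    (hnone : ∀ i, 1 ≤ i → i ≤ limit → (d.get? (String.ofList (suf.take i))).isSome = false) :
    pvWalk d prefs suf limit 0 none = none :=
  pv_walk_stable d prefs suf limit 0 none (fun i h1 h2 => hnone i h1 (by omega))

-- every key of the dict built from the association list is a first component of a pair
theorem pv_mem_keys_ofList (l : List (String × String)) (k : String)
    (h : k ∈ (PySem.Dict.ofList l).keys) : k ∈ l.map Prod.fst := by
  have he : PySem.Dict.ofList l
      = l.foldl (fun d (p : String × String) => d.insert p.1 p.2) PySem.Dict.empty := rfl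
  rw [he, PySem.Dict.keys_foldl_insert_key] at h
  simp only [PySem.Dict.keys_empty] at h
  have : PySem.Set.update [] (l.map Prod.fst) = PySem.Set.ofList (l.map Prod.fst) := rfl
  rw [this, PySem.Set.mem_ofList] at h
  exact h

-- the two loops take the same step and agree, given non-empty keys,
-- the sorted key list, and the Source B prefix set / maxlen
theorem pv_loop_eq (d : PySem.Dict String String) (skeys : List String)
    (prefs : PySem.Set String) (maxlen : Nat)
    (hne : ∀ k ∈ skeys, k.toList ≠ [])
    (hkeys : ∀ k, k ∈ skeys ↔ (d.get? k).isSome = true)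
    (hsort : skeys.Pairwise (fun a b => b.toList.length ≤ a.toList.length))
    (hpref : ∀ k ∈ skeys, ∀ i, i < k.toList.length →
        PySem.Set.contains prefs (String.ofList (k.toList.take (i + 1))) = true)
    (hmax : ∀ k ∈ skeys, k.toList.length ≤ maxlen) :
    ∀ (fuel : Nat) (suf : List Char) (out : List (List Char)) (reps : PySem.Dict String String),
      pvLoopA d skeys fuel suf out.flatten reps
        = ((pvLoopB d prefs maxlen fuel suf out reps).1.flatten,
           (pvLoopB d prefs maxlen fuel suf out reps).2) := by
  intro fuel
  induction fuel with
  | zero => intro suf out reps; rfl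
  | succ n ih =>
    intro suf out reps
    cases suf with
    | nil => rfl
    | cons c rest =>
      rw [pvLoopA, pvLoopB]
      cases hf : skeys.find? (fun k => PySem.Chars.startswith (c :: rest) k.toList) with
      | some k =>
        -- A found the longest matching key k; show B's walk returns its length
        have hpk : PySem.Chars.startswith (c :: rest) k.toList = true := by
          simpa using List.find?_some hf
        have hkmem : k ∈ skeys := List.mem_of_find?_eq_some hf
        have hkpre : k.toList <+: (c :: rest) := (PySem.Chars.startswith_iff _ _).mp hpk
        have hktake : (c :: rest).take k.toList.length = k.toList := by
          rw [List.prefix_iff_eq_take] at hkpre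
          exact hkpre.symm
        have hjm1 : 1 ≤ k.toList.length := by
          have := hne k hkmem
          cases hx : k.toList with
          | nil => exact absurd hx this
          | cons a b => simp
        have hjml : k.toList.length ≤ min (c :: rest).length maxlen := by
          refine le_min ?_ (hmax k hkmem)
          exact hkpre.length_le
        have hmem : (d.get? (String.ofList ((c :: rest).take k.toList.length))).isSome = true := by
          rw [hktake, String.ofList_toList]
          exact (hkeys k).mp hkmem
        have hprefs : ∀ i, i < k.toList.length →
            PySem.Set.contains prefs (String.ofList ((c :: rest).take (i + 1))) = true := by
          intro i hi
          have : (c :: rest).take (i + 1) = k.toList.take (i + 1) := by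
            rw [← hktake, List.take_take]
            congr 1
            omega
          rw [this]
          exact hpref k hkmem i hi
        have hmaxi : ∀ i, k.toList.length < i → i ≤ min (c :: rest).length maxlen →
            (d.get? (String.ofList ((c :: rest).take i))).isSome = false := by
          intro i hi1 hi2
          by_contra hcon
          rw [Bool.not_eq_false] at hcon
          set k' := String.ofList ((c :: rest).take i) with hk'
          have hk'mem : k' ∈ skeys := (hkeys k').mpr hcon
          have hk'list : k'.toList = (c :: rest).take i := String.toList_ofList
          have hk'len : k'.toList.length = i := by
            rw [hk'list, List.length_take]
            omega
          have hk'match : PySem.Chars.startswith (c :: rest) k'.toList = true := by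
            rw [PySem.Chars.startswith_iff, hk'list]
            exact List.take_prefix _ _
          have := pv_find?_max hsort hf k' hk'mem hk'match
          omega
        rw [pv_walk_eq_some d prefs (c :: rest) k.toList.length _ hjm1 hjml hmem hprefs hmaxi]
        simp only
        rw [hktake, String.ofList_toList]
        have := ih ((c :: rest).drop k.toList.length) (out ++ [(d.getD k "").toList])
          (reps.insert k (d.getD k ""))
        simpa [List.flatten_append] using this
      | none =>
        have hnone : ∀ i, 1 ≤ i → i ≤ min (c :: rest).length maxlen →
            (d.get? (String.ofList ((c :: rest).take i))).isSome = false := by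
          intro i hi1 hi2
          by_contra hcon
          rw [Bool.not_eq_false] at hcon
          set k' := String.ofList ((c :: rest).take i) with hk'
          have hk'mem : k' ∈ skeys := (hkeys k').mpr hcon
          have hk'match : PySem.Chars.startswith (c :: rest) k'.toList = true := by
            rw [PySem.Chars.startswith_iff, String.toList_ofList]
            exact List.take_prefix _ _
          have := List.find?_eq_none.mp hf k' hk'mem
          rw [hk'match] at this
          cases this rfl
        rw [pv_walk_eq_none d prefs (c :: rest) _ hnone]
        simp only
        have := ih rest (out ++ [[c]]) (reps.insert (String.ofList [c]) (String.ofList [c]))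
        simpa [List.flatten_append] using this

-- ===== VERDICT (by name: the statement is the Claim_ definition above) =====
theorem replace_substrings_spec : Claim_equal_replace_substrings := by
  intro s rd _ hpre
  unfold Spec_replace_substrings
  rcases hpre with hpre | hnil
  case inr => subst hnil; rfl
  simp only [replace_substrings, replace_substrings_alt]
  set d := PySem.Dict.ofList rd with hd
  set skeys := PySem.List.sorted d.keys (fun k => k.toList.length) true with hsk
  have hmemsk : ∀ k, k ∈ skeys ↔ k ∈ d.keys := fun k => PySem.List.mem_sorted _ _ _ _
  have hne : ∀ k ∈ skeys, k.toList ≠ [] := by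
    intro k hk
    have hk2 := pv_mem_keys_ofList rd k ((hmemsk k).mp hk)
    rcases List.mem_map.mp hk2 with ⟨p, hp, hpe⟩
    have := List.all_eq_true.mp hpre p hp
    simp only [Bool.not_eq_eq_eq_not, Bool.not_true, beq_eq_false_iff_ne] at this
    subst hpe
    intro hnil
    apply this
    have h2 := congrArg String.ofList hnil
    rwa [String.ofList_toList] at h2
  have hnd : d.keys.Nodup := PySem.Dict.nodup_keys_ofList rd
  have hkeys : ∀ k, k ∈ skeys ↔ (d.get? k).isSome = true := by
    intro k
    rw [hmemsk k]
    constructor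
    · intro h
      cases hg : d.get? k with
      | none => exact absurd h ((PySem.Dict.get?_eq_none_iff_not_mem_keys d k).mp hg)
      | some v => rfl
    · intro h
      by_contra hcon
      rw [(PySem.Dict.get?_eq_none_iff_not_mem_keys d k).mpr hcon] at h
      cases h
  have hsort : skeys.Pairwise (fun a b => b.toList.length ≤ a.toList.length) :=
    PySem.List.sorted_pairwise_rev _ _
  have hpref : ∀ k ∈ skeys, ∀ i, i < k.toList.length →
      PySem.Set.contains
        (d.keys.foldl (fun s k =>
          (List.range k.toList.length).foldl
            (fun s j => PySem.Set.add s (String.ofList (k.toList.take (j + 1)))) s)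
          PySem.Set.empty)
        (String.ofList (k.toList.take (i + 1))) = true := by
    intro k hk i hi
    rw [PySem.Set.contains_iff]
    exact pv_prefs_mem d.keys PySem.Set.empty k ((hmemsk k).mp hk) i hi
  have hmax : ∀ k ∈ skeys, k.toList.length ≤
      d.keys.foldl (fun m k => max m k.toList.length) 0 := by
    intro k hk
    exact pv_foldl_max_ge d.keys 0 k ((hmemsk k).mp hk)
  have hmain := pv_loop_eq d skeys _ _ hne hkeys hsort hpref hmax
    s.toList.length s.toList [] PySem.Dict.empty
  simp only [List.flatten_nil] at hmain
  rw [hmain]
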